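-- pv_equiv track=rewrite | github.com/Palasanu/Take-Grant-Model | Take-Grant.py | is_bridge
-- ===== SOURCE A (Python) =====
-- def who_takes(x, graf):
-- 	nodes = list()
-- 	for item,val in graf.items():
-- 		for value in val:
-- 			if(value[0] == x):
-- 				for i in range(1, len(value)):
-- 					if value[i] == 't':
-- 						nodes.append(item)
-- 	if len(nodes)==0:
-- 		return False
-- 	else:
-- 		return nodes
--
-- def who_grats(x,graf):
-- 	nodes = list()
-- 	for item,val in graf.items():
-- 		for value in val:
-- 			if(value[0] == x):
-- 				for i in range(1, len(value)):
-- 					if value[i] == 'g':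
-- 						nodes.append(item)
-- 	if len(nodes)==0:
-- 		return False
-- 	else:
-- 		return nodes
--
-- def grants(x,graf):
-- 	nodes = list()
-- 	for item,val in graf.items():
-- 		if item == x:
-- 			for value in val:
-- 				for i in range(1, len(value)):
-- 					if value[i] == 'g':
-- 						nodes.append(value[0])
-- 	if len(nodes)==0:
-- 		return False
-- 	else:
-- 		return nodes
--
-- def takes(x,graf):
-- 	nodes = list()
-- 	for item,val in graf.items():
-- 		if item == x:
-- 			for value in val:
-- 				for i in range(1, len(value)):
-- 					if value[i] == 't':
-- 						nodes.append(value[0])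
-- 	if len(nodes)==0:
-- 		return False
-- 	else:
-- 		return nodes
--
-- def noduri_intinde_terminal(y,graf,nodes):
-- 	nodes_that_take = who_takes(y, graf)
-- 	if(nodes_that_take != False):
-- 		for nod in nodes_that_take:
-- 			nodes.append(nod)
-- 			noduri_intinde_terminal(nod,graf,nodes)
-- 	return nodes
--
-- def noduri_intind_terminal(x,graf,nodes):
-- 	nodes_take = takes(x, graf)
-- 	if(nodes_take != False):
-- 		for nod in nodes_take:
-- 			nodes.append(nod)
-- 			noduri_intind_terminal(nod,graf,nodes)
-- 	return nodes
--
-- def is_bridge(x,y,graf):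
-- 	if x == y:
-- 		return True
-- 	elif x in noduri_intinde_terminal(y,graf,list()):
-- 		return True
-- 	elif y in noduri_intinde_terminal(x,graf,list()):
-- 		return True
-- 	noduri = noduri_intind_terminal(y,graf,list())
-- 	if noduri !=False:
-- 		for nod in noduri:
-- 			noduri = who_grats(nod,graf)
-- 			if(noduri != False):
-- 				for nod_grant in noduri:
-- 					if x in noduri_intinde_terminal(nod_grant,graf,list()):
-- 						return True
-- 	noduri = noduri_intind_terminal(y,graf,list())
-- 	if noduri !=False:
-- 		for nod in noduri:
-- 			noduri = grants(nod,graf)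
-- 			if(noduri != False):
-- 				for nod_grant in noduri:
-- 					if x in noduri_intinde_terminal(nod_grant,graf,list()):
-- 						return True
--
-- 	return False
-- ===== SOURCE B (Python) =====
-- # Alternative exact re-implementation: build take/grant edge lists and adjacency maps
-- # once, then compute each reachability closure by bounded rounds of set expansion
-- # (early exit at the fixpoint) instead of A's visited-less recursive DFS.
-- def is_bridge(x, y, graf):
--     if x == y:
--         return True
--     tedges = [(u, v[0]) for u, vals in graf.items() for v in vals for r in v[1:] if r == 't']
--     gedges = [(u, v[0]) for u, vals in graf.items() for v in vals for r in v[1:] if r == 'g']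
--
--     def build(edges):
--         d = {}
--         for a, b in edges:
--             d.setdefault(a, set()).add(b)
--         return d
--
--     tfwd = build(tedges)
--     trev = build([(b, a) for a, b in tedges])
--     gadj = build(gedges + [(b, a) for a, b in gedges])
--     n = len(graf)
--
--     def closure(starts, adj):
--         s = set(starts)
--         for _ in range(n):
--             new = {w for v in s for w in adj.get(v, ())} - s
--             if not new:
--                 break
--             s |= new
--         return s
--
--     if x in closure(trev.get(y, ()), trev):
--         return True
--     if y in closure(trev.get(x, ()), trev):
--         return True
--     fy = closure(tfwd.get(y, ()), tfwd)
--     return any(x in closure(trev.get(g, ()), trev)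
--                for nod in fy for g in gadj.get(nod, ()))
-- ===== Notes on version B (the rewrite author's own statement) =====
-- stated objective: alternative
-- what changed: A answers each reachability question by a visited-less recursive DFS that rescans the whole dict for neighbours at every step; B instead extracts the take/grant edge lists once, builds forward/reverse/undirected adjacency maps, and computes each closure by bounded rounds of set expansion with early exit at the fixpoint.
-- outside the precondition, e.g. on is_bridge('a', 'b', {'c': [['c', 't']]}): A returns False, B returns False
import Mathlib
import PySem

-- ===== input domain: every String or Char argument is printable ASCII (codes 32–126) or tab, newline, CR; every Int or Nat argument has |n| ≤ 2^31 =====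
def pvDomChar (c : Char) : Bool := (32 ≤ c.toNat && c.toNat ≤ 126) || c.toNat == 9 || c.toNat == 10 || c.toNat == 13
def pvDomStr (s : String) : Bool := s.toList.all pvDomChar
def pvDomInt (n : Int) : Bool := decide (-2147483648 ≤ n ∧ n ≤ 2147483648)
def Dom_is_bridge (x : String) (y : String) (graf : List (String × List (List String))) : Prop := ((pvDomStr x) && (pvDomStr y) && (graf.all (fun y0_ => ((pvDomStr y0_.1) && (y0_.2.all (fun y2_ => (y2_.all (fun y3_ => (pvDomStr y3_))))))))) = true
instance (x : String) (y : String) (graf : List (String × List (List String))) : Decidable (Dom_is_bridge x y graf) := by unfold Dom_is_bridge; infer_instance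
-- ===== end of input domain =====

-- B precomputes take/grant adjacency maps once and replaces A's unbounded visited-less
-- recursive DFS by bounded rounds of set expansion (objective: alternative).

-- ===== PORT A =====
-- graf is a Python dict: iterate its items with PySem.Dict semantics
def pyItems (graf : List (String × List (List String))) : List (String × List (List String)) :=
  (PySem.Dict.ofList graf).items

-- who_takes; `value[0]` is ported as `headD ""` (on an empty inner list Python raises
-- IndexError; those inputs are outside Pre_is_bridge)
def whoTakesList (x : String) (graf : List (String × List (List String))) : List String :=
  (pyItems graf).foldl (fun nodes iv =>
    iv.2.foldl (fun nodes v =>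
      if v.headD "" == x then
        (v.drop 1).foldl (fun nodes r => if r == "t" then nodes ++ [iv.1] else nodes) nodes
      else nodes) nodes) []

-- who_grats
def whoGratsList (x : String) (graf : List (String × List (List String))) : List String :=
  (pyItems graf).foldl (fun nodes iv =>
    iv.2.foldl (fun nodes v =>
      if v.headD "" == x then
        (v.drop 1).foldl (fun nodes r => if r == "g" then nodes ++ [iv.1] else nodes) nodes
      else nodes) nodes) []

-- takes
def takesList (x : String) (graf : List (String × List (List String))) : List String :=
  (pyItems graf).foldl (fun nodes iv =>
    if iv.1 == x then
      iv.2.foldl (fun nodes v =>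
        (v.drop 1).foldl (fun nodes r => if r == "t" then nodes ++ [v.headD ""] else nodes) nodes) nodes
    else nodes) []

-- grants
def grantsList (x : String) (graf : List (String × List (List String))) : List String :=
  (pyItems graf).foldl (fun nodes iv =>
    if iv.1 == x then
      iv.2.foldl (fun nodes v =>
        (v.drop 1).foldl (fun nodes r => if r == "g" then nodes ++ [v.headD ""] else nodes) nodes) nodes
    else nodes) []

-- Shared recursion scheme of noduri_intinde_terminal / noduri_intind_terminal (the two
-- Python functions are verbatim copies of each other differing only in the neighbour
-- function, who_takes resp. takes).  Python's recursion is unbounded; `fuel` bounds the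
-- depth, and under Pre_is_bridge (no take-cycle) depth (#keys)+1 is never exhausted
-- (every recursion step moves to a distinct dict key), so the cut is never taken on
-- admitted inputs.
def nitGo (f : String → List String) : Nat → String → List String → List String
  | 0, _, nodes => nodes
  | n+1, a, nodes => (f a).foldl (fun acc nod => nitGo f n nod (acc ++ [nod])) nodes

def pyFuel (graf : List (String × List (List String))) : Nat :=
  (PySem.Dict.ofList graf).size + 1

-- noduri_intinde_terminal (upstream take-closure of y, via who_takes)
def noduriIntindeTerminal (y : String) (graf : List (String × List (List String)))
    (nodes : List String) : List String :=
  nitGo (fun b => whoTakesList b graf) (pyFuel graf) y nodes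

-- noduri_intind_terminal (downstream take-closure of x, via takes)
def noduriIntindTerminal (x : String) (graf : List (String × List (List String)))
    (nodes : List String) : List String :=
  nitGo (fun a => takesList a graf) (pyFuel graf) x nodes

def is_bridge (x : String) (y : String) (graf : List (String × List (List String))) : Bool :=
  if x == y then true
  else if (noduriIntindeTerminal y graf []).contains x then true
  else if (noduriIntindeTerminal x graf []).contains y then true
  else
    let noduri := noduriIntindTerminal y graf []
    -- Python's `if noduri != False:` is always true here (noduri is a list); the early
    -- returns of the two for-loops are `any`
    if noduri.any (fun nod => (whoGratsList nod graf).any (fun g =>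
        (noduriIntindeTerminal g graf []).contains x)) then true
    else if noduri.any (fun nod => (grantsList nod graf).any (fun g =>
        (noduriIntindeTerminal g graf []).contains x)) then true
    else false

-- ===== PORT B =====
-- [(u, v[0]) for u, vals in graf.items() for v in vals for r in v[1:] if r == 't']
-- (v[0] is only evaluated when v[1:] is nonempty, so headD "" is exact here)
def tEdges (graf : List (String × List (List String))) : List (String × String) :=
  (pyItems graf).flatMap (fun uv => uv.2.flatMap (fun v =>
    ((v.drop 1).filter (fun r => r == "t")).map (fun _ => (uv.1, v.headD ""))))

def gEdges (graf : List (String × List (List String))) : List (String × String) :=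
  (pyItems graf).flatMap (fun uv => uv.2.flatMap (fun v =>
    ((v.drop 1).filter (fun r => r == "g")).map (fun _ => (uv.1, v.headD ""))))

-- build: d.setdefault(a, set()).add(b)
def buildAdj (edges : List (String × String)) : PySem.Dict String (PySem.Set String) :=
  edges.foldl (fun d ab => d.modify ab.1 [] (fun s => PySem.Set.add s ab.2)) PySem.Dict.empty

-- one round: new = {w for v in s for w in adj.get(v, ())} - s; break if empty; s |= new
-- (the `break` leaves the remaining rounds as identity steps of the iterate)
def closStep (adj : PySem.Dict String (PySem.Set String)) (s : PySem.Set String) :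
    PySem.Set String :=
  let nw := PySem.Set.diff (PySem.Set.ofList (s.flatMap (fun v => adj.getD v []))) s
  if nw.isEmpty then s else PySem.Set.update s nw

def closureB (n : Nat) (adj : PySem.Dict String (PySem.Set String)) (starts : List String) :
    PySem.Set String :=
  (closStep adj)^[n] (PySem.Set.ofList starts)

def is_bridge_alt (x : String) (y : String) (graf : List (String × List (List String))) : Bool :=
  if x == y then true
  else
    let tE := tEdges graf
    let gE := gEdges graf
    let tfwd := buildAdj tE
    let trev := buildAdj (tE.map (fun ab => (ab.2, ab.1)))
    let gadj := buildAdj (gE ++ gE.map (fun ab => (ab.2, ab.1)))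
    let n := (PySem.Dict.ofList graf).size
    if (closureB n trev (trev.getD y [])).contains x then true
    else if (closureB n trev (trev.getD x [])).contains y then true
    else
      let fy := closureB n tfwd (tfwd.getD y [])
      fy.any (fun nod => (gadj.getD nod []).any (fun g =>
        (closureB n trev (trev.getD g [])).contains x))

-- ===== PRECONDITION & SPEC =====
-- helpers for Pre_ (independent of both ports): take-successors and their closure
def preTSucc (graf : List (String × List (List String))) (a : String) : List String :=
  ((PySem.Dict.ofList graf).getD a []).flatMap (fun v =>
    if "t" ∈ v.drop 1 then [v.headD ""] else [])

def preReach (graf : List (String × List (List String))) (a : String) : List String :=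
  (fun s => PySem.Set.update s (s.flatMap (preTSucc graf)))^[(PySem.Dict.ofList graf).size]
    (PySem.Set.ofList (preTSucc graf a))

-- Pre_ excludes inputs with x ≠ y on which A raises: an empty inner value list raises
-- IndexError, and a cycle of take edges sends the unbounded DFS into infinite recursion
-- (RecursionError); acyclicity is required globally, slightly narrower than the exact
-- crash set (a take-cycle none of A's traversals reaches is also excluded — see cites).
def Pre_is_bridge (x : String) (y : String) (graf : List (String × List (List String))) : Prop :=
  x = y ∨ ((∀ p ∈ (PySem.Dict.ofList graf).items, ∀ v ∈ p.2, v ≠ []) ∧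
           ∀ k ∈ (PySem.Dict.ofList graf).keys, k ∉ preReach graf k)
instance (x : String) (y : String) (graf : List (String × List (List String))) :
    Decidable (Pre_is_bridge x y graf) := by unfold Pre_is_bridge; infer_instance

def pvWitness_is_bridge : String × String × (List (String × List (List String))) :=
  ("x", "y", [("y", [["n", "t"]]), ("g", [["n", "g"]]), ("x", [["g", "t"]])])

def Spec_is_bridge (x : String) (y : String) (graf : List (String × List (List String)))
    (out : Bool) : Prop := out = is_bridge_alt x y graf
instance (x : String) (y : String) (graf : List (String × List (List String))) (out : Bool) :
    Decidable (Spec_is_bridge x y graf out) := by unfold Spec_is_bridge; infer_instance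

-- ===== CLAIM (what is proved, stated in full; the proofs are below) =====
def Claim_equal_is_bridge : Prop := ∀ (x : String) (y : String)
    (graf : List (String × List (List String))), Dom_is_bridge x y graf →
    Pre_is_bridge x y graf → Spec_is_bridge x y graf (is_bridge x y graf)

-- ===== LEMMAS AND PROOFS =====
def TE (graf : List (String × List (List String))) (a b : String) : Prop :=
  ∃ p ∈ pyItems graf, p.1 = a ∧ ∃ v ∈ p.2, v.headD "" = b ∧ "t" ∈ v.drop 1

def GE (graf : List (String × List (List String))) (a b : String) : Prop :=
  ∃ p ∈ pyItems graf, p.1 = a ∧ ∃ v ∈ p.2, v.headD "" = b ∧ "g" ∈ v.drop 1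

theorem whoShape_eq (c x : String) (graf : List (String × List (List String))) :
    (pyItems graf).foldl (fun nodes iv =>
      iv.2.foldl (fun nodes v =>
        if v.headD "" == x then
          (v.drop 1).foldl (fun nodes r => if r == c then nodes ++ [iv.1] else nodes) nodes
        else nodes) nodes) [] =
    (pyItems graf).flatMap (fun iv => iv.2.flatMap (fun v =>
      if v.headD "" == x then ((v.drop 1).filter (fun r => r == c)).map (fun _ => iv.1)
      else [])) := by
  have mid : ∀ (item : String) (vals : List (List String)) (acc : List String),
      vals.foldl (fun nodes v =>
        if v.headD "" == x then
          (v.drop 1).foldl (fun nodes r => if r == c then nodes ++ [item] else nodes) nodes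
        else nodes) acc =
      acc ++ vals.flatMap (fun v =>
        if v.headD "" == x then ((v.drop 1).filter (fun r => r == c)).map (fun _ => item)
        else []) := by
    intro item vals acc
    rw [← PySem.List.foldl_append_eq_flatMap]
    apply PySem.List.foldl_congr_mem
    intro acc2 v _
    by_cases h : (v.headD "" == x) = true
    · simp only [h, if_true]
      exact PySem.List.foldl_append_if _ _ _ _
    · rw [if_neg h, if_neg h, List.append_nil]
  have main : (pyItems graf).foldl (fun nodes iv =>
      iv.2.foldl (fun nodes v =>
        if v.headD "" == x then
          (v.drop 1).foldl (fun nodes r => if r == c then nodes ++ [iv.1] else nodes) nodes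
        else nodes) nodes) [] =
      [] ++ (pyItems graf).flatMap (fun iv => iv.2.flatMap (fun v =>
        if v.headD "" == x then ((v.drop 1).filter (fun r => r == c)).map (fun _ => iv.1)
        else [])) := by
    rw [← PySem.List.foldl_append_eq_flatMap]
    apply PySem.List.foldl_congr_mem
    intro acc iv _
    exact mid iv.1 iv.2 acc
  simpa using main

theorem takesShape_eq (c x : String) (graf : List (String × List (List String))) :
    (pyItems graf).foldl (fun nodes iv =>
      if iv.1 == x then
        iv.2.foldl (fun nodes v =>
          (v.drop 1).foldl (fun nodes r => if r == c then nodes ++ [v.headD ""] else nodes) nodes) nodes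
      else nodes) [] =
    (pyItems graf).flatMap (fun iv =>
      if iv.1 == x then iv.2.flatMap (fun v =>
        ((v.drop 1).filter (fun r => r == c)).map (fun _ => v.headD ""))
      else []) := by
  have mid : ∀ (vals : List (List String)) (acc : List String),
      vals.foldl (fun nodes v =>
        (v.drop 1).foldl (fun nodes r => if r == c then nodes ++ [v.headD ""] else nodes) nodes) acc =
      acc ++ vals.flatMap (fun v =>
        ((v.drop 1).filter (fun r => r == c)).map (fun _ => v.headD "")) := by
    intro vals acc
    rw [← PySem.List.foldl_append_eq_flatMap]
    apply PySem.List.foldl_congr_mem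
    intro acc2 v _
    exact PySem.List.foldl_append_if _ _ _ _
  have main : (pyItems graf).foldl (fun nodes iv =>
      if iv.1 == x then
        iv.2.foldl (fun nodes v =>
          (v.drop 1).foldl (fun nodes r => if r == c then nodes ++ [v.headD ""] else nodes) nodes) nodes
      else nodes) [] =
      [] ++ (pyItems graf).flatMap (fun iv =>
        if iv.1 == x then iv.2.flatMap (fun v =>
          ((v.drop 1).filter (fun r => r == c)).map (fun _ => v.headD ""))
        else []) := by
    rw [← PySem.List.foldl_append_eq_flatMap]
    apply PySem.List.foldl_congr_mem
    intro acc iv _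
    by_cases h : (iv.1 == x) = true
    · simp only [h, if_true]
      exact mid iv.2 acc
    · rw [if_neg h, if_neg h, List.append_nil]
  simpa using main

theorem mem_whoTakesList (graf : List (String × List (List String))) (b u : String) :
    u ∈ whoTakesList b graf ↔ TE graf u b := by
  show u ∈ (pyItems graf).foldl _ [] ↔ _
  rw [whoShape_eq "t" b graf]
  simp only [TE, List.mem_flatMap, List.mem_ite_nil_right, List.mem_map, List.mem_filter,
    beq_iff_eq]
  constructor
  · rintro ⟨iv, hiv, v, hv, hb, r, ⟨hr, rfl⟩, rfl⟩
    exact ⟨iv, hiv, rfl, v, hv, hb, hr⟩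
  · rintro ⟨iv, hiv, rfl, v, hv, hb, hr⟩
    exact ⟨iv, hiv, v, hv, hb, "t", ⟨hr, rfl⟩, rfl⟩
theorem mem_whoGratsList (graf : List (String × List (List String))) (b u : String) :
    u ∈ whoGratsList b graf ↔ GE graf u b := by
  show u ∈ (pyItems graf).foldl _ [] ↔ _
  rw [whoShape_eq "g" b graf]
  simp only [GE, List.mem_flatMap, List.mem_ite_nil_right, List.mem_map, List.mem_filter,
    beq_iff_eq]
  constructor
  · rintro ⟨iv, hiv, v, hv, hb, r, ⟨hr, rfl⟩, rfl⟩
    exact ⟨iv, hiv, rfl, v, hv, hb, hr⟩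
  · rintro ⟨iv, hiv, rfl, v, hv, hb, hr⟩
    exact ⟨iv, hiv, v, hv, hb, "g", ⟨hr, rfl⟩, rfl⟩

theorem mem_takesList (graf : List (String × List (List String))) (a u : String) :
    u ∈ takesList a graf ↔ TE graf a u := by
  show u ∈ (pyItems graf).foldl _ [] ↔ _
  rw [takesShape_eq "t" a graf]
  simp only [TE, List.mem_flatMap, List.mem_ite_nil_right, List.mem_map, List.mem_filter,
    beq_iff_eq]
  constructor
  · rintro ⟨iv, hiv, ha, v, hv, r, ⟨hr, rfl⟩, rfl⟩
    exact ⟨iv, hiv, ha, v, hv, rfl, hr⟩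
  · rintro ⟨iv, hiv, ha, v, hv, rfl, hr⟩
    exact ⟨iv, hiv, ha, v, hv, "t", ⟨hr, rfl⟩, rfl⟩

theorem mem_grantsList (graf : List (String × List (List String))) (a u : String) :
    u ∈ grantsList a graf ↔ GE graf a u := by
  show u ∈ (pyItems graf).foldl _ [] ↔ _
  rw [takesShape_eq "g" a graf]
  simp only [GE, List.mem_flatMap, List.mem_ite_nil_right, List.mem_map, List.mem_filter,
    beq_iff_eq]
  constructor
  · rintro ⟨iv, hiv, ha, v, hv, r, ⟨hr, rfl⟩, rfl⟩
    exact ⟨iv, hiv, ha, v, hv, rfl, hr⟩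
  · rintro ⟨iv, hiv, ha, v, hv, rfl, hr⟩
    exact ⟨iv, hiv, ha, v, hv, "g", ⟨hr, rfl⟩, rfl⟩

theorem mem_tEdges (graf : List (String × List (List String))) (a b : String) :
    (a, b) ∈ tEdges graf ↔ TE graf a b := by
  simp only [tEdges, TE, List.mem_flatMap, List.mem_map, List.mem_filter, beq_iff_eq,
    Prod.mk.injEq]
  constructor
  · rintro ⟨iv, hiv, v, hv, r, ⟨hr, rfl⟩, ha, hb⟩
    exact ⟨iv, hiv, ha, v, hv, hb, hr⟩
  · rintro ⟨iv, hiv, ha, v, hv, hb, hr⟩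
    exact ⟨iv, hiv, v, hv, "t", ⟨hr, rfl⟩, ha, hb⟩

theorem mem_gEdges (graf : List (String × List (List String))) (a b : String) :
    (a, b) ∈ gEdges graf ↔ GE graf a b := by
  simp only [gEdges, GE, List.mem_flatMap, List.mem_map, List.mem_filter, beq_iff_eq,
    Prod.mk.injEq]
  constructor
  · rintro ⟨iv, hiv, v, hv, r, ⟨hr, rfl⟩, ha, hb⟩
    exact ⟨iv, hiv, ha, v, hv, hb, hr⟩
  · rintro ⟨iv, hiv, ha, v, hv, hb, hr⟩
    exact ⟨iv, hiv, v, hv, "g", ⟨hr, rfl⟩, ha, hb⟩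

theorem mem_getD_buildAdj_aux (edges : List (String × String)) :
    ∀ (d : PySem.Dict String (PySem.Set String)) (a c : String),
      c ∈ (edges.foldl (fun d ab => d.modify ab.1 [] (fun s => PySem.Set.add s ab.2)) d).getD a []
        ↔ c ∈ d.getD a [] ∨ (a, c) ∈ edges := by
  induction edges with
  | nil => intro d a c; simp
  | cons e es ih =>
    obtain ⟨e1, e2⟩ := e
    intro d a c
    rw [List.foldl_cons, ih, PySem.Dict.getD_modify]
    simp only [List.mem_cons, Prod.mk.injEq]
    by_cases h : a = e1
    · subst h
      rw [if_pos rfl, PySem.Set.mem_add]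
      tauto
    · rw [if_neg h]
      tauto

theorem mem_getD_buildAdj (edges : List (String × String)) (a c : String) :
    c ∈ (buildAdj edges).getD a [] ↔ (a, c) ∈ edges := by
  rw [buildAdj, mem_getD_buildAdj_aux]
  simp
def chainLe (R : String → String → Prop) : Nat → String → String → Prop
  | 0 => fun _ _ => False
  | n+1 => fun a u => ∃ c, R a c ∧ (u = c ∨ chainLe R n c u)

theorem chainLe_mono {R : String → String → Prop} :
    ∀ {n : Nat} {a u : String}, chainLe R n a u → chainLe R (n+1) a u := by
  intro n
  induction n with
  | zero => intro a u h; exact h.elim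
  | succ n ih =>
    rintro a u ⟨c, hR, h⟩
    exact ⟨c, hR, h.imp id ih⟩

theorem chainLe_congr {R R' : String → String → Prop}
    (h : ∀ a c, R a c ↔ R' a c) :
    ∀ {n : Nat} {a u : String}, chainLe R n a u ↔ chainLe R' n a u := by
  intro n
  induction n with
  | zero => intro a u; exact Iff.rfl
  | succ n ih =>
    intro a u
    exact exists_congr fun c => and_congr (h a c) (or_congr Iff.rfl ih)

theorem nit_fold_mem (f : String → List String) (n : Nat)
    (hn : ∀ (a : String) (acc : List String) (u : String),
      u ∈ nitGo f n a acc ↔ u ∈ acc ∨ chainLe (fun a c => c ∈ f a) n a u) :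
    ∀ (l acc : List String) (u : String),
      u ∈ l.foldl (fun acc nod => nitGo f n nod (acc ++ [nod])) acc ↔
        u ∈ acc ∨ ∃ c ∈ l, (u = c ∨ chainLe (fun a c => c ∈ f a) n c u) := by
  intro l
  induction l with
  | nil => intro acc u; simp
  | cons c l ih =>
    intro acc u
    rw [List.foldl_cons, ih, hn]
    simp only [List.mem_append, List.mem_cons, List.not_mem_nil, or_false]
    constructor
    · rintro (((h | h) | h) | ⟨d, hd, h⟩)
      · exact Or.inl h
      · exact Or.inr ⟨c, Or.inl rfl, Or.inl h⟩
      · exact Or.inr ⟨c, Or.inl rfl, Or.inr h⟩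
      · exact Or.inr ⟨d, Or.inr hd, h⟩
    · rintro (h | ⟨d, (rfl | hd), h⟩)
      · exact Or.inl (Or.inl (Or.inl h))
      · rcases h with h | h
        · exact Or.inl (Or.inl (Or.inr h))
        · exact Or.inl (Or.inr h)
      · exact Or.inr ⟨d, hd, h⟩

theorem mem_nitGo (f : String → List String) :
    ∀ (n : Nat) (a : String) (acc : List String) (u : String),
      u ∈ nitGo f n a acc ↔ u ∈ acc ∨ chainLe (fun a c => c ∈ f a) n a u := by
  intro n
  induction n with
  | zero => intro a acc u; simp [nitGo, chainLe]
  | succ n ih =>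
    intro a acc u
    show u ∈ (f a).foldl (fun acc nod => nitGo f n nod (acc ++ [nod])) acc ↔ _
    rw [nit_fold_mem f n ih]
    rfl

theorem mem_closStepG (g : String → List String) (s : PySem.Set String) (u : String) :
    u ∈ (if (PySem.Set.diff (PySem.Set.ofList (s.flatMap g)) s).isEmpty then s
         else PySem.Set.update s (PySem.Set.diff (PySem.Set.ofList (s.flatMap g)) s)) ↔
      u ∈ s ∨ u ∈ s.flatMap g := by
  by_cases h : (PySem.Set.diff (PySem.Set.ofList (s.flatMap g)) s).isEmpty
  · simp only [h, if_true]
    rw [List.isEmpty_iff] at h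
    constructor
    · exact Or.inl
    · rintro (hu | hu)
      · exact hu
      · by_contra hs
        have : u ∈ PySem.Set.diff (PySem.Set.ofList (s.flatMap g)) s :=
          (PySem.Set.mem_diff _ _ _).mpr ⟨(PySem.Set.mem_ofList _ _).mpr hu, hs⟩
        rw [h] at this
        exact absurd this (List.not_mem_nil)
  · simp only [h, Bool.false_eq_true, if_false]
    rw [PySem.Set.mem_update, PySem.Set.mem_diff, PySem.Set.mem_ofList]
    tauto

theorem mem_closIter (g : String → List String) :
    ∀ (n : Nat) (s0 : List String) (u : String),
      u ∈ (fun s => if (PySem.Set.diff (PySem.Set.ofList (s.flatMap g)) s).isEmpty then s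
            else PySem.Set.update s (PySem.Set.diff (PySem.Set.ofList (s.flatMap g)) s))^[n] s0 ↔
        ∃ a ∈ s0, u = a ∨ chainLe (fun a c => c ∈ g a) n a u := by
  intro n
  induction n with
  | zero => intro s0 u; simp [chainLe]
  | succ n ih =>
    intro s0 u
    rw [Function.iterate_succ_apply, ih]
    constructor
    · rintro ⟨a, ha, h⟩
      rw [mem_closStepG] at ha
      rcases ha with ha | ha
      · refine ⟨a, ha, ?_⟩
        rcases h with rfl | h
        · exact Or.inl rfl
        · exact Or.inr (chainLe_mono h)
      · rw [List.mem_flatMap] at ha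
        obtain ⟨b, hb, hab⟩ := ha
        refine ⟨b, hb, Or.inr ⟨a, hab, h⟩⟩
    · rintro ⟨a, ha, h⟩
      rcases h with heq | ⟨c, hc, h⟩
      · exact ⟨a, by rw [mem_closStepG]; exact Or.inl ha, Or.inl heq⟩
      · refine ⟨c, ?_, h⟩
        rw [mem_closStepG]
        exact Or.inr (List.mem_flatMap.mpr ⟨a, ha, hc⟩)

theorem A_rev_iff (graf : List (String × List (List String))) (b u : String) :
    u ∈ noduriIntindeTerminal b graf [] ↔
      chainLe (fun p c => TE graf c p) (pyFuel graf) b u := by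
  unfold noduriIntindeTerminal
  rw [mem_nitGo]
  simp only [List.not_mem_nil, false_or]
  exact chainLe_congr (fun a c => mem_whoTakesList graf a c)

theorem A_fwd_iff (graf : List (String × List (List String))) (a u : String) :
    u ∈ noduriIntindTerminal a graf [] ↔ chainLe (TE graf) (pyFuel graf) a u := by
  unfold noduriIntindTerminal
  rw [mem_nitGo]
  simp only [List.not_mem_nil, false_or]
  exact chainLe_congr (fun a c => mem_takesList graf a c)

theorem B_clos_mem (adj : PySem.Dict String (PySem.Set String)) (n : Nat)
    (starts : List String) (u : String) :
    u ∈ closureB n adj starts ↔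
      ∃ a ∈ starts, u = a ∨ chainLe (fun a c => c ∈ adj.getD a []) n a u := by
  show u ∈ (fun s => if (PySem.Set.diff
            (PySem.Set.ofList (s.flatMap (fun v => adj.getD v []))) s).isEmpty then s
          else PySem.Set.update s (PySem.Set.diff
            (PySem.Set.ofList (s.flatMap (fun v => adj.getD v []))) s))^[n]
        (PySem.Set.ofList starts) ↔ _
  rw [mem_closIter]
  simp only [PySem.Set.mem_ofList]

theorem mem_trev (graf : List (String × List (List String))) (a c : String) :
    c ∈ (buildAdj ((tEdges graf).map (fun ab => (ab.2, ab.1)))).getD a [] ↔ TE graf c a := by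
  rw [mem_getD_buildAdj]
  constructor
  · rintro hm
    rw [List.mem_map] at hm
    obtain ⟨⟨p, q⟩, hpq, heq⟩ := hm
    obtain ⟨rfl, rfl⟩ := Prod.mk.injEq .. ▸ heq
    exact (mem_tEdges graf _ _).mp hpq
  · intro h
    exact List.mem_map.mpr ⟨(c, a), (mem_tEdges graf c a).mpr h, rfl⟩

theorem mem_tfwd (graf : List (String × List (List String))) (a c : String) :
    c ∈ (buildAdj (tEdges graf)).getD a [] ↔ TE graf a c := by
  rw [mem_getD_buildAdj]
  exact mem_tEdges graf a c

theorem mem_gadj (graf : List (String × List (List String))) (nod g : String) :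
    g ∈ (buildAdj (gEdges graf ++ (gEdges graf).map (fun ab => (ab.2, ab.1)))).getD nod []
      ↔ GE graf nod g ∨ GE graf g nod := by
  rw [mem_getD_buildAdj, List.mem_append]
  constructor
  · rintro (h | h)
    · exact Or.inl ((mem_gEdges graf nod g).mp h)
    · rw [List.mem_map] at h
      obtain ⟨⟨p, q⟩, hpq, heq⟩ := h
      obtain ⟨rfl, rfl⟩ := Prod.mk.injEq .. ▸ heq
      exact Or.inr ((mem_gEdges graf _ _).mp hpq)
  · rintro (h | h)
    · exact Or.inl ((mem_gEdges graf nod g).mpr h)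
    · exact Or.inr (List.mem_map.mpr ⟨(g, nod), (mem_gEdges graf g nod).mpr h, rfl⟩)

theorem B_rev_iff (graf : List (String × List (List String))) (b u : String) :
    u ∈ closureB ((PySem.Dict.ofList graf).size)
        (buildAdj ((tEdges graf).map (fun ab => (ab.2, ab.1))))
        ((buildAdj ((tEdges graf).map (fun ab => (ab.2, ab.1)))).getD b [])
      ↔ chainLe (fun p c => TE graf c p) (pyFuel graf) b u := by
  rw [B_clos_mem]
  simp only [mem_trev]
  show _ ↔ ∃ c, TE graf c b ∧ (u = c ∨ _)
  rfl

theorem B_fwd_iff (graf : List (String × List (List String))) (a u : String) :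
    u ∈ closureB ((PySem.Dict.ofList graf).size) (buildAdj (tEdges graf))
        ((buildAdj (tEdges graf)).getD a [])
      ↔ chainLe (TE graf) (pyFuel graf) a u := by
  rw [B_clos_mem]
  simp only [mem_tfwd]
  show _ ↔ ∃ c, TE graf a c ∧ (u = c ∨ _)
  rfl

-- the common reachability proposition both programs decide
def BigProp (x y : String) (graf : List (String × List (List String))) : Prop :=
  x = y ∨ chainLe (fun p c => TE graf c p) (pyFuel graf) y x ∨
    chainLe (fun p c => TE graf c p) (pyFuel graf) x y ∨
    ∃ nod, chainLe (TE graf) (pyFuel graf) y nod ∧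
      ∃ g, (GE graf g nod ∨ GE graf nod g) ∧
        chainLe (fun p c => TE graf c p) (pyFuel graf) g x

theorem A_iff (x y : String) (graf : List (String × List (List String))) :
    is_bridge x y graf = true ↔ BigProp x y graf := by
  unfold is_bridge BigProp
  dsimp only
  split_ifs with h1 h2 h3 h4 h5
  · rw [beq_iff_eq] at h1
    exact iff_of_true rfl (Or.inl h1)
  · rw [List.contains_iff_mem, A_rev_iff] at h2
    exact iff_of_true rfl (Or.inr (Or.inl h2))
  · rw [List.contains_iff_mem, A_rev_iff] at h3
    exact iff_of_true rfl (Or.inr (Or.inr (Or.inl h3)))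
  · rw [List.any_eq_true] at h4
    obtain ⟨nod, hnod, h4⟩ := h4
    rw [List.any_eq_true] at h4
    obtain ⟨g, hg, h4⟩ := h4
    rw [A_fwd_iff] at hnod
    rw [mem_whoGratsList] at hg
    rw [List.contains_iff_mem, A_rev_iff] at h4
    exact iff_of_true rfl (Or.inr (Or.inr (Or.inr ⟨nod, hnod, g, Or.inl hg, h4⟩)))
  · rw [List.any_eq_true] at h5
    obtain ⟨nod, hnod, h5⟩ := h5
    rw [List.any_eq_true] at h5
    obtain ⟨g, hg, h5⟩ := h5
    rw [A_fwd_iff] at hnod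
    rw [mem_grantsList] at hg
    rw [List.contains_iff_mem, A_rev_iff] at h5
    exact iff_of_true rfl (Or.inr (Or.inr (Or.inr ⟨nod, hnod, g, Or.inr hg, h5⟩)))
  · refine iff_of_false (by simp) ?_
    rintro (h | h | h | ⟨nod, hnod, g, hge, hcx⟩)
    · exact h1 (beq_iff_eq.mpr h)
    · exact h2 (by rw [List.contains_iff_mem, A_rev_iff]; exact h)
    · exact h3 (by rw [List.contains_iff_mem, A_rev_iff]; exact h)
    · rcases hge with hg | hg
      · refine h4 ?_
        rw [List.any_eq_true]
        refine ⟨nod, (A_fwd_iff graf y nod).mpr hnod, ?_⟩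
        rw [List.any_eq_true]
        exact ⟨g, (mem_whoGratsList graf nod g).mpr hg,
          by rw [List.contains_iff_mem, A_rev_iff]; exact hcx⟩
      · refine h5 ?_
        rw [List.any_eq_true]
        refine ⟨nod, (A_fwd_iff graf y nod).mpr hnod, ?_⟩
        rw [List.any_eq_true]
        exact ⟨g, (mem_grantsList graf nod g).mpr hg,
          by rw [List.contains_iff_mem, A_rev_iff]; exact hcx⟩

theorem B_iff (x y : String) (graf : List (String × List (List String))) :
    is_bridge_alt x y graf = true ↔ BigProp x y graf := by
  unfold is_bridge_alt BigProp
  dsimp only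
  split_ifs with h1 h2 h3
  · rw [beq_iff_eq] at h1
    exact iff_of_true rfl (Or.inl h1)
  · rw [PySem.Set.contains_iff, B_rev_iff] at h2
    exact iff_of_true rfl (Or.inr (Or.inl h2))
  · rw [PySem.Set.contains_iff, B_rev_iff] at h3
    exact iff_of_true rfl (Or.inr (Or.inr (Or.inl h3)))
  · rw [List.any_eq_true]
    constructor
    · rintro ⟨nod, hnod, h⟩
      rw [B_fwd_iff] at hnod
      rw [List.any_eq_true] at h
      obtain ⟨g, hg, h⟩ := h
      rw [mem_gadj] at hg
      rw [PySem.Set.contains_iff, B_rev_iff] at h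
      exact Or.inr (Or.inr (Or.inr ⟨nod, hnod, g, hg.symm, h⟩))
    · rintro (h | h | h | ⟨nod, hnod, g, hge, hcx⟩)
      · exact absurd (beq_iff_eq.mpr h) h1
      · exact absurd (by rw [PySem.Set.contains_iff, B_rev_iff]; exact h) h2
      · exact absurd (by rw [PySem.Set.contains_iff, B_rev_iff]; exact h) h3
      · refine ⟨nod, (B_fwd_iff graf y nod).mpr hnod, ?_⟩
        rw [List.any_eq_true]
        exact ⟨g, (mem_gadj graf nod g).mpr hge.symm,
          by rw [PySem.Set.contains_iff, B_rev_iff]; exact hcx⟩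

-- ===== VERDICT (by name: the statement is the Claim_ definition above) =====
theorem is_bridge_spec : Claim_equal_is_bridge := by
  intro x y graf _ _
  unfold Spec_is_bridge
  rw [Bool.eq_iff_iff, A_iff, B_iff]
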